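-- pv_equiv track=rewrite | github.com/pypi-data/pypi-code-10 | coconut/coconut-0.3.2.zip/coconut/parser.py | list_proc
-- ===== SOURCE A (Python) =====
-- def list_proc(tokens):
--     """Properly formats lists."""
--     out = []
--     for x in range(0, len(tokens)):
--         if x%2 == 0:
--             out.append(tokens[x])
--         else:
--             out[-1] += tokens[x]
--     return " ".join(out)
-- ===== SOURCE B (Python) =====
-- def list_proc(tokens):
--     """Properly formats lists."""
--     n = len(tokens)
--     out = []
--     for i in range(0, n, 2):
--         if i + 1 < n:
--             out.append(tokens[i] + tokens[i + 1])
--         else: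
--             out.append(tokens[i])
--     return " ".join(out)
-- ===== Notes on version B (the rewrite author's own statement) =====
-- stated objective: simpler
-- what changed: Iterates indices two at a time, appending each merged pair (or the lone final token) directly, instead of a per-element loop with a parity branch and out[-1] mutation.
import Mathlib
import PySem

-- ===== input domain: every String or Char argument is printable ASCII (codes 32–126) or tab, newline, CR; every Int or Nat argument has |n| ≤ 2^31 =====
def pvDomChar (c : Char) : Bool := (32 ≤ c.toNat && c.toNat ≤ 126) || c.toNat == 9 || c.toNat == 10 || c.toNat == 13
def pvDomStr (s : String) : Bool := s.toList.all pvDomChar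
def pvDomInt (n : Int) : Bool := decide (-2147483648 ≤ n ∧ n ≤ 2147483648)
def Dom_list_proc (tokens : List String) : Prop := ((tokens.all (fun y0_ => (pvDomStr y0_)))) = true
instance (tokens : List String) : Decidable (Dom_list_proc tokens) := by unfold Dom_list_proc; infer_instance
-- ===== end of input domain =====

-- B merges each pair by iterating indices two at a time and appending the merged pair directly,
-- instead of A's per-element loop with a parity branch and `out[-1] +=` mutation (same cost).

-- ===== PORT A =====
-- 'out[-1] += t'; the [] case is Python's IndexError, unreachable because the odd branch
-- only runs after an even-index append has made out nonempty.
def pvAddLast : List String → String → List String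
  | [], _ => []
  | [a], t => [a ++ t]
  | a :: b :: rest, t => a :: pvAddLast (b :: rest) t

def list_proc (tokens : List String) : String :=
  let out := (PySem.List.pyRange 0 (PySem.List.len tokens) 1).foldl
    (fun out x =>
      if PySem.Int.mod x 2 = 0 then out ++ [PySem.List.pyGetD tokens x ""]
      else pvAddLast out (PySem.List.pyGetD tokens x "")) []
  PySem.Str.join " " out

-- ===== PORT B =====
def list_proc_alt (tokens : List String) : String :=
  let n := PySem.List.len tokens
  let out := (PySem.List.pyRange 0 n 2).foldl
    (fun out i =>
      if i + 1 < n then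
        out ++ [PySem.List.pyGetD tokens i "" ++ PySem.List.pyGetD tokens (i + 1) ""]
      else
        out ++ [PySem.List.pyGetD tokens i ""]) []
  PySem.Str.join " " out

-- ===== PRECONDITION & SPEC =====
def Spec_list_proc (tokens : List String) (out : String) : Prop := out = list_proc_alt tokens
instance (tokens : List String) (out : String) : Decidable (Spec_list_proc tokens out) := by unfold Spec_list_proc; infer_instance

-- ===== CLAIM (what is proved, stated in full; the proofs are below) =====
def Claim_equal_list_proc : Prop := ∀ (tokens : List String), Dom_list_proc tokens → Spec_list_proc tokens (list_proc tokens)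

-- ===== LEMMAS AND PROOFS =====

-- the merged-pair list both loops build
def pvPairs : List String → List String
  | [] => []
  | [a] => [a]
  | a :: b :: rest => (a ++ b) :: pvPairs rest

theorem pvAddLast_append (acc : List String) (c t : String) :
    pvAddLast (acc ++ [c]) t = acc ++ [c ++ t] := by
  induction acc with
  | nil => rfl
  | cons a rest ih =>
      cases rest with
      | nil => simp [pvAddLast]
      | cons b r => simpa [pvAddLast] using ih

theorem pvGetD_shift2 (a b : String) (rest : List String) (m : Nat) :
    PySem.List.pyGetD (a :: b :: rest) ((m : Int) + 2) "" = PySem.List.pyGetD rest (m : Int) "" := by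
  have h : (m : Int) + 2 = ((m + 2 : Nat) : Int) := by push_cast; ring
  rw [h, PySem.List.pyGetD_natCast, PySem.List.pyGetD_natCast]
  simp [List.getD]

theorem pvA_loop (ts : List String) (acc : List String) :
    (PySem.List.pyRange 0 (PySem.List.len ts) 1).foldl
      (fun out x =>
        if PySem.Int.mod x 2 = 0 then out ++ [PySem.List.pyGetD ts x ""]
        else pvAddLast out (PySem.List.pyGetD ts x "")) acc
    = acc ++ pvPairs ts := by
  induction ts using pvPairs.induct generalizing acc with
  | case1 =>
      simp [PySem.List.pyRange_one_eq_nil, pvPairs]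
  | case2 a =>
      have h1 : PySem.List.pyRange 0 (PySem.List.len [a]) 1 = [0] := by
        rw [show PySem.List.len [a] = 1 from by simp [PySem.List.len_eq]]
        decide
      have g0 : PySem.List.pyGetD [a] 0 "" = a := PySem.List.pyGetD_zero_cons a [] ""
      have e0 : PySem.Int.mod 0 2 = 0 := by decide
      rw [h1]
      simp only [List.foldl_cons, List.foldl_nil]
      rw [if_pos e0, g0]
      simp [pvPairs]
  | case3 a b rest ih =>
      have hn : PySem.List.len (a :: b :: rest) = (rest.length : Int) + 2 := by
        simp [PySem.List.len_eq]; omega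
      have hsplit : PySem.List.pyRange 0 ((rest.length : Int) + 2) 1
          = 0 :: 1 :: PySem.List.pyRange 2 ((rest.length : Int) + 2) 1 := by
        rw [PySem.List.pyRange_one_cons (by omega), PySem.List.pyRange_one_cons (by omega)]
        norm_num
      have hshift : PySem.List.pyRange 2 ((rest.length : Int) + 2) 1
          = (PySem.List.pyRange 0 (rest.length : Int) 1).map (fun k => k + 2) := by
        rw [PySem.List.pyRange_one, PySem.List.pyRange_one]
        simp only [List.map_map]
        congr 1
        · funext k; simp [Function.comp]; ring
        · congr 1; omega
      have e0 : PySem.Int.mod 0 2 = 0 := by decide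
      have e1 : ¬ PySem.Int.mod 1 2 = 0 := by decide
      have g0 : PySem.List.pyGetD (a :: b :: rest) 0 "" = a :=
        PySem.List.pyGetD_zero_cons a (b :: rest) ""
      have g1 : PySem.List.pyGetD (a :: b :: rest) 1 "" = b := by
        have h1 : (1 : Int) = ((1 : Nat) : Int) := by norm_num
        rw [h1, PySem.List.pyGetD_natCast]; rfl
      rw [hn, hsplit]
      simp only [List.foldl_cons]
      rw [if_pos e0, if_neg e1, g0, g1, pvAddLast_append acc a b, hshift, List.foldl_map]
      rw [PySem.List.foldl_congr_mem _ _
        (fun out x =>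
          if PySem.Int.mod x 2 = 0 then out ++ [PySem.List.pyGetD rest x ""]
          else pvAddLast out (PySem.List.pyGetD rest x "")) _ ?_]
      · rw [show ((rest.length : Nat) : Int) = PySem.List.len rest from (PySem.List.len_eq rest).symm,
           ih (acc ++ [a ++ b])]
        simp [pvPairs]
      · intro out k hk
        have hk0 : 0 ≤ k ∧ k < (rest.length : Int) := PySem.List.mem_pyRange_one.mp hk
        obtain ⟨m, rfl⟩ : ∃ m : Nat, k = (m : Int) := ⟨k.toNat, by omega⟩
        have hmod : PySem.Int.mod ((m : Int) + 2) 2 = PySem.Int.mod (m : Int) 2 := by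
          rw [PySem.Int.mod_eq_emod_of_pos (by norm_num), PySem.Int.mod_eq_emod_of_pos (by norm_num)]
          omega
        rw [hmod, pvGetD_shift2 a b rest m]

theorem pvRange_two_cons (a b : Int) (h : a < b) :
    PySem.List.pyRange a b 2 = a :: PySem.List.pyRange (a + 2) b 2 := by
  rw [PySem.List.pyRange_of_pos a b (by norm_num),
      PySem.List.pyRange_of_pos (a + 2) b (by norm_num)]
  by_cases h2 : a + 2 < b
  · rw [if_pos h, if_pos h2]
    have hc : (b - a + 2 - 1) / 2 = (b - (a + 2) + 2 - 1) / 2 + 1 := by omega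
    have hct : ((b - a + 2 - 1) / 2).toNat = ((b - (a + 2) + 2 - 1) / 2).toNat + 1 := by omega
    rw [hct, List.range_succ_eq_map]
    simp only [List.map_cons, List.map_map]
    congr 1
    · norm_num
    · congr 1
      funext k
      simp [Function.comp]
      ring
  · rw [if_pos h, if_neg h2]
    have hct : ((b - a + 2 - 1) / 2).toNat = 1 := by omega
    rw [hct]
    simp [List.range_one]

theorem pvRange_two_shift (m : Int) :
    PySem.List.pyRange 2 (m + 2) 2 = (PySem.List.pyRange 0 m 2).map (fun k => k + 2) := by
  rw [PySem.List.pyRange_of_pos 2 (m + 2) (by norm_num),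
      PySem.List.pyRange_of_pos 0 m (by norm_num)]
  by_cases hm : 0 < m
  · rw [if_pos (by omega : (2 : Int) < m + 2), if_pos hm]
    have he : m + 2 - 2 + 2 - 1 = m - 0 + 2 - 1 := by ring
    rw [he, List.map_map]
    congr 1
    funext k; simp [Function.comp]; ring
  · rw [if_neg (by omega : ¬ (2 : Int) < m + 2), if_neg hm]
    simp

theorem pvB_loop (ts : List String) (acc : List String) :
    (PySem.List.pyRange 0 (PySem.List.len ts) 2).foldl
      (fun out i =>
        if i + 1 < PySem.List.len ts then
          out ++ [PySem.List.pyGetD ts i "" ++ PySem.List.pyGetD ts (i + 1) ""]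
        else
          out ++ [PySem.List.pyGetD ts i ""]) acc
    = acc ++ pvPairs ts := by
  induction ts using pvPairs.induct generalizing acc with
  | case1 =>
      have h0 : PySem.List.pyRange 0 (PySem.List.len ([] : List String)) 2 = [] := by rfl
      rw [h0]
      simp [pvPairs]
  | case2 a =>
      have h1 : PySem.List.pyRange 0 (PySem.List.len [a]) 2 = [0] := by
        rw [show PySem.List.len [a] = 1 from by simp [PySem.List.len_eq]]
        decide
      have hc : ¬ ((0 : Int) + 1 < PySem.List.len [a]) := by
        simp [PySem.List.len_eq]
      have g0 : PySem.List.pyGetD [a] 0 "" = a := PySem.List.pyGetD_zero_cons a [] ""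
      rw [h1]
      simp only [List.foldl_cons, List.foldl_nil]
      rw [if_neg hc, g0]
      simp [pvPairs]
  | case3 a b rest ih =>
      have hn : PySem.List.len (a :: b :: rest) = (rest.length : Int) + 2 := by
        simp [PySem.List.len_eq]; omega
      have g0 : PySem.List.pyGetD (a :: b :: rest) 0 "" = a :=
        PySem.List.pyGetD_zero_cons a (b :: rest) ""
      have g1 : PySem.List.pyGetD (a :: b :: rest) (0 + 1) "" = b := by
        norm_num
        have h1 : (1 : Int) = ((1 : Nat) : Int) := by norm_num
        rw [h1, PySem.List.pyGetD_natCast]; rfl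
      rw [hn, pvRange_two_cons 0 ((rest.length : Int) + 2) (by omega)]
      simp only [List.foldl_cons]
      rw [if_pos (by omega : (0 : Int) + 1 < (rest.length : Int) + 2), g0, g1]
      rw [show (0 : Int) + 2 = 2 by norm_num, pvRange_two_shift (rest.length : Int),
          List.foldl_map]
      rw [PySem.List.foldl_congr_mem _ _
        (fun out i =>
          if i + 1 < PySem.List.len rest then
            out ++ [PySem.List.pyGetD rest i "" ++ PySem.List.pyGetD rest (i + 1) ""]
          else
            out ++ [PySem.List.pyGetD rest i ""]) _ ?_]
      · rw [show ((rest.length : Nat) : Int) = PySem.List.len rest from (PySem.List.len_eq rest).symm,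
           ih (acc ++ [a ++ b])]
        simp [pvPairs]
      · intro out k hk
        have hk0 : 0 ≤ k := by
          rw [PySem.List.pyRange_of_pos 0 (rest.length : Int) (by norm_num)] at hk
          simp at hk
          obtain ⟨m, _, rfl⟩ := hk
          omega
        obtain ⟨m, rfl⟩ : ∃ m : Nat, k = (m : Int) := ⟨k.toNat, by omega⟩
        have hg2 : PySem.List.pyGetD (a :: b :: rest) ((m : Int) + 2 + 1) ""
            = PySem.List.pyGetD rest ((m : Int) + 1) "" := by
          have h1 : (m : Int) + 2 + 1 = ((m + 1 : Nat) : Int) + 2 := by push_cast; ring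
          have h2 : (m : Int) + 1 = ((m + 1 : Nat) : Int) := by push_cast; ring
          rw [h1, h2, pvGetD_shift2 a b rest (m + 1)]
        simp only [PySem.List.len_eq]
        by_cases hcm : (m : Int) + 1 < (rest.length : Int)
        · rw [if_pos (by omega : (m : Int) + 2 + 1 < (rest.length : Int) + 2), if_pos hcm,
              hg2, pvGetD_shift2 a b rest m]
        · rw [if_neg (by omega : ¬ (m : Int) + 2 + 1 < (rest.length : Int) + 2), if_neg hcm,
              pvGetD_shift2 a b rest m]

-- ===== VERDICT (by name: the statement is the Claim_ definition above) =====
theorem list_proc_spec : Claim_equal_list_proc := by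
  intro ts _
  show list_proc ts = list_proc_alt ts
  simp only [list_proc, list_proc_alt]
  rw [pvA_loop ts [], pvB_loop ts []]
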